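-- pv_equiv track=rewrite | github.com/Shubhs0411/Pubmed_Miner | llm_groq.py | _choose_primary_summary
-- ===== SOURCE A (Python) =====
-- from typing import List, Dict, Any, Optional, Tuple
--
-- def _choose_primary_summary(category: Optional[str], summaries):
--     if not summaries: return None, []
--     cat = (category or "").lower()
--     def rank(s: str) -> int:
--         sl = s.lower(); score = 0
--         if cat == "rna_synthesis":
--             if "rna synthesis" in sl: score += 3
--             if "replication" in sl: score += 2
--         elif cat == "virion_assembly":
--             if "assembly" in sl: score += 3
--             if "particle" in sl or "virion" in sl: score += 2
--         for kw in ["abolish","abolished","impair","impaired","reduce","reduced",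
--                    "increase","increased","block","blocked","disable","disabled","enhance","enhanced"]:
--             if kw in sl: score += 1
--         if "no effect" in sl or "not affect" in sl or "did not affect" in sl: score -= 2
--         return score
--     ranked = sorted(summaries, key=lambda s: (-rank(s), summaries.index(s)))
--     primary = ranked[0]
--     supporting = [s for s in ranked[1:] if s != primary]
--     return primary, supporting
-- ===== SOURCE B (Python) =====
-- def _choose_primary_summary(category, summaries):
--     if not summaries:
--         return None, []
--     cat = (category or "").lower()
--     def rank(s: str) -> int:
--         sl = s.lower(); score = 0
--         if cat == "rna_synthesis":
--             if "rna synthesis" in sl: score += 3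
--             if "replication" in sl: score += 2
--         elif cat == "virion_assembly":
--             if "assembly" in sl: score += 3
--             if "particle" in sl or "virion" in sl: score += 2
--         for kw in ["abolish","abolished","impair","impaired","reduce","reduced",
--                    "increase","increased","block","blocked","disable","disabled","enhance","enhanced"]:
--             if kw in sl: score += 1
--         if "no effect" in sl or "not affect" in sl or "did not affect" in sl: score -= 2
--         return score
--     # multiplicity of each distinct summary (first-occurrence order)
--     counts = {}
--     for s in summaries:
--         counts[s] = counts.get(s, 0) + 1
--     # bucket the distinct summaries by score; no sort over the summaries at all
--     buckets = {}
--     for s in counts: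
--         buckets.setdefault(rank(s), []).append(s)
--     best = max(buckets)
--     primary = buckets[best][0]
--     supporting = []
--     for score in sorted(buckets, reverse=True):
--         for s in buckets[score]:
--             if s != primary:
--                 supporting += [s] * counts[s]
--     return primary, supporting
-- ===== Notes on version B (the rewrite author's own statement) =====
-- stated objective: faster
-- what changed: A sorts all summaries with a key that calls summaries.index(s) (an O(n) scan per element); B never sorts the summaries: it counts multiplicities, buckets the distinct summaries by score in a dict, picks the max score's first bucket entry as primary, and emits buckets in descending score order, sorting only the distinct integer scores.
import Mathlib
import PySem

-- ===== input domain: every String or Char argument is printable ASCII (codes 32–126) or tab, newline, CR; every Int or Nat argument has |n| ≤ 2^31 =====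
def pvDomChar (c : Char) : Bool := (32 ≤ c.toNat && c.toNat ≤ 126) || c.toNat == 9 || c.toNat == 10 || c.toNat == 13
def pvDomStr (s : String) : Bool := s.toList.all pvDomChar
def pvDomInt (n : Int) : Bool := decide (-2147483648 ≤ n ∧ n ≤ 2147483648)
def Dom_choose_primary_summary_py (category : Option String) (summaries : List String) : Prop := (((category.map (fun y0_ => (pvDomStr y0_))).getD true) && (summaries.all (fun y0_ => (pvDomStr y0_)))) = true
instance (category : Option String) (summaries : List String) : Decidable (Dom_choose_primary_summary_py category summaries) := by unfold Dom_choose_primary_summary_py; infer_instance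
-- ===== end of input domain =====

-- B replaces A's quadratic sort keyed by (-rank, summaries.index(s)) with a count dict plus a
-- score-bucket dict over the distinct summaries: primary is the first entry of the max-score
-- bucket, supporting is the buckets emitted in descending score order — only the distinct
-- integer scores are sorted (objective: faster — no sort of the summaries, no O(n) .index scan).


-- ===== PORT A =====
-- helper shared by both ports: the Pythons' identical inner `rank` function
def pvKw : List String := ["abolish","abolished","impair","impaired","reduce","reduced",
  "increase","increased","block","blocked","disable","disabled","enhance","enhanced"]

def pvRank (cat : String) (s : String) : Int :=
  let sl := PySem.Str.lower s
  let score : Int := 0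
  let score :=
    if cat = "rna_synthesis" then
      let score := if PySem.Str.isIn "rna synthesis" sl then score + 3 else score
      if PySem.Str.isIn "replication" sl then score + 2 else score
    else if cat = "virion_assembly" then
      let score := if PySem.Str.isIn "assembly" sl then score + 3 else score
      if PySem.Str.isIn "particle" sl || PySem.Str.isIn "virion" sl then score + 2 else score
    else score
  let score := pvKw.foldl (fun sc kw => if PySem.Str.isIn kw sl then sc + 1 else sc) score
  if PySem.Str.isIn "no effect" sl || PySem.Str.isIn "not affect" sl || PySem.Str.isIn "did not affect" sl
    then score - 2 else score

-- summaries.index(s) is applied only to s ∈ summaries, so the ValueError branch (none) is dead; .getD 0 is exact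
def choose_primary_summary_py (category : Option String) (summaries : List String) : Option String × List String :=
  if summaries = [] then (none, [])
  else
    let cat := PySem.Str.lower (category.getD "")
    let ranked := PySem.List.sorted2 summaries
      (fun s => -(pvRank cat s)) (fun s => (PySem.List.index? summaries s).getD 0) false
    match ranked with
    | [] => (none, [])  -- unreachable: summaries ≠ []
    | p :: rest => (some p, rest.filter (fun s => s != p))

-- ===== PORT B =====
-- buckets[best][0] and the dict lookups cannot raise (best is a key, every bucket is nonempty);
-- the match-none arms are those dead branches
def choose_primary_summary_py_alt (category : Option String) (summaries : List String) : Option String × List String :=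
  if summaries = [] then (none, [])
  else
    let cat := PySem.Str.lower (category.getD "")
    let counts := summaries.foldl (fun d s => d.modify s 0 (fun c => c + 1)) (PySem.Dict.empty : PySem.Dict String Int)
    let buckets := counts.keys.foldl (fun b s => b.modify (pvRank cat s) [] (fun l => l ++ [s])) (PySem.Dict.empty : PySem.Dict Int (List String))
    match PySem.List.max? buckets.keys (fun x => x) with
    | none => (none, [])
    | some best =>
      match (buckets.getD best []).head? with
      | none => (none, [])
      | some primary =>
        let supporting := (PySem.List.sorted buckets.keys (fun x => x) true).foldl
          (fun acc score => (buckets.getD score []).foldl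
            (fun acc2 s => if s != primary then acc2 ++ List.replicate (counts.getD s 0).toNat s else acc2) acc) []
        (some primary, supporting)

-- ===== PRECONDITION & SPEC =====
def Spec_choose_primary_summary_py (category : Option String) (summaries : List String) (out : Option String × List String) : Prop := out = choose_primary_summary_py_alt category summaries
instance (category : Option String) (summaries : List String) (out : Option String × List String) : Decidable (Spec_choose_primary_summary_py category summaries out) := by unfold Spec_choose_primary_summary_py; infer_instance

-- ===== CLAIM (what is proved, stated in full; the proofs are below) =====
def Claim_equal_choose_primary_summary_py : Prop := ∀ (category : Option String) (summaries : List String), Dom_choose_primary_summary_py category summaries → Spec_choose_primary_summary_py category summaries (choose_primary_summary_py category summaries)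

-- ===== LEMMAS AND PROOFS =====

-- the lexicographic strict order A's sort key induces on distinct summaries (rank desc, first index asc)
def pvPlex (r : String → Int) (idx : String → Nat) (a b : String) : Prop :=
  r b < r a ∨ (r a = r b ∧ idx a < idx b)

-- its reflexive companion: the pairwise order both final lists satisfy
def pvLe (r : String → Int) (idx : String → Nat) (a b : String) : Prop :=
  r b < r a ∨ (r a = r b ∧ idx a ≤ idx b)

theorem pv_insertBy_pairwise {α : Type} (bf : α → α → Bool)
    (h1 : ∀ a b, bf a b = true → bf b a = false)
    (h2 : ∀ a b c, bf a b = true → bf c b = false → bf c a = false)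
    (x : α) (ys : List α) (h : ys.Pairwise (fun a b => bf b a = false)) :
    (PySem.List.insertBy bf x ys).Pairwise (fun a b => bf b a = false) := by
  induction ys with
  | nil => simp [PySem.List.insertBy]
  | cons y ys ih =>
    rw [List.pairwise_cons] at h
    by_cases hxy : bf x y = true
    · rw [show PySem.List.insertBy bf x (y :: ys) = x :: y :: ys by simp [PySem.List.insertBy, hxy]]
      refine List.pairwise_cons.mpr ⟨?_, List.pairwise_cons.mpr h⟩
      intro b hb
      rcases List.mem_cons.mp hb with rfl | hb
      · exact h1 _ _ hxy
      · exact h2 _ _ _ hxy (h.1 b hb)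
    · rw [show PySem.List.insertBy bf x (y :: ys) = y :: PySem.List.insertBy bf x ys by
        simp [PySem.List.insertBy, hxy]]
      refine List.pairwise_cons.mpr ⟨?_, ih h.2⟩
      intro b hb
      rcases (PySem.List.mem_insertBy bf x b ys).mp hb with rfl | hb
      · exact eq_false_of_ne_true hxy
      · exact h.1 b hb

theorem pv_foldl_insertBy_pairwise {α : Type} (bf : α → α → Bool)
    (h1 : ∀ a b, bf a b = true → bf b a = false)
    (h2 : ∀ a b c, bf a b = true → bf c b = false → bf c a = false)
    (l : List α) : ∀ (acc : List α), acc.Pairwise (fun a b => bf b a = false) →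
    (List.foldl (fun acc x => PySem.List.insertBy bf x acc) acc l).Pairwise (fun a b => bf b a = false) := by
  induction l with
  | nil => intro acc h; simpa using h
  | cons x l ih =>
    intro acc h
    exact ih _ (pv_insertBy_pairwise bf h1 h2 x acc h)

theorem pv_insertBy_plex (r : String → Int) (idx : String → Nat) (x : String) (ys : List String)
    (h : ys.Pairwise (pvPlex r idx)) (hidx : ∀ y ∈ ys, idx y < idx x) :
    (PySem.List.insertBy (fun a b => decide (r b < r a)) x ys).Pairwise (pvPlex r idx) := by
  induction ys with
  | nil => simp [PySem.List.insertBy]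
  | cons y ys ih =>
    rw [List.pairwise_cons] at h
    by_cases hxy : r y < r x
    · rw [show PySem.List.insertBy (fun a b => decide (r b < r a)) x (y :: ys) = x :: y :: ys by
        simp [PySem.List.insertBy, hxy]]
      refine List.pairwise_cons.mpr ⟨?_, List.pairwise_cons.mpr h⟩
      intro b hb
      rcases List.mem_cons.mp hb with rfl | hb
      · exact Or.inl hxy
      · rcases h.1 b hb with h' | ⟨h', _⟩
        · exact Or.inl (lt_trans h' hxy)
        · exact Or.inl (h' ▸ hxy)
    · rw [show PySem.List.insertBy (fun a b => decide (r b < r a)) x (y :: ys)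
          = y :: PySem.List.insertBy (fun a b => decide (r b < r a)) x ys by
        simp [PySem.List.insertBy, hxy]]
      refine List.pairwise_cons.mpr ⟨?_, ih h.2 (fun z hz => hidx z (List.mem_cons_of_mem _ hz))⟩
      intro b hb
      rcases (PySem.List.mem_insertBy _ x b ys).mp hb with rfl | hb
      · rcases lt_or_eq_of_le (not_lt.mp hxy) with h' | h'
        · exact Or.inl h'
        · exact Or.inr ⟨h'.symm, hidx y (List.mem_cons_self ..)⟩
      · exact h.1 b hb

theorem pv_foldl_insertBy_plex (r : String → Int) (idx : String → Nat)
    (l : List String) : ∀ (acc : List String), acc.Pairwise (pvPlex r idx) →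
    (∀ a ∈ acc, ∀ b ∈ l, idx a < idx b) →
    l.Pairwise (fun a b => idx a < idx b) →
    (List.foldl (fun acc x => PySem.List.insertBy (fun a b => decide (r b < r a)) x acc) acc l).Pairwise (pvPlex r idx) := by
  induction l with
  | nil => intro acc h _ _; simpa using h
  | cons x l ih =>
    intro acc h hcross hl
    rw [List.pairwise_cons] at hl
    refine ih _ (pv_insertBy_plex r idx x acc h
      (fun y hy => hcross y hy x (List.mem_cons_self ..))) ?_ hl.2
    intro a ha b hb
    rcases (PySem.List.mem_insertBy _ x a acc).mp ha with rfl | ha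
    · exact hl.1 b hb
    · exact hcross a ha b (List.mem_cons_of_mem _ hb)

theorem pv_idx_mem (xs : List String) (s : String) (hs : s ∈ xs) :
    (PySem.List.index? xs s).getD 0 = xs.idxOf s := by
  cases h : List.idxOf? s xs with
  | none => exact absurd (List.idxOf?_eq_none_iff.mp h) (by simpa using hs)
  | some i => simp [PySem.List.index?, h, List.idxOf_eq_getD_idxOf?]

theorem pv_ofList_aux (xs : List String) : ∀ (l p : List String), xs = p ++ l →
    (PySem.Set.ofList p).Pairwise (fun a b => xs.idxOf a < xs.idxOf b) →
    (List.foldl PySem.Set.add (PySem.Set.ofList p) l).Pairwise (fun a b => xs.idxOf a < xs.idxOf b) := by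
  intro l
  induction l with
  | nil => intro p _ h; simpa using h
  | cons x l ih =>
    intro p hxs h
    have hof : PySem.Set.add (PySem.Set.ofList p) x = PySem.Set.ofList (p ++ [x]) := by
      simp [PySem.Set.ofList, List.foldl_append]
    have hpw : (PySem.Set.ofList (p ++ [x])).Pairwise (fun a b => xs.idxOf a < xs.idxOf b) := by
      rw [← hof, PySem.Set.add]
      by_cases hxp : x ∈ p
      · rw [if_pos (by simpa using hxp)]
        exact h
      · rw [if_neg (by simpa using hxp)]
        refine List.pairwise_append.mpr ⟨h, List.pairwise_singleton _ _, ?_⟩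
        intro a ha b hb
        rw [List.mem_singleton] at hb
        subst hb
        have hap : a ∈ p := (PySem.Set.mem_ofList p a).mp ha
        have h1 : xs.idxOf a = p.idxOf a := by
          rw [hxs]; exact List.idxOf_append_of_mem hap
        have h2 : xs.idxOf b = p.length := by
          rw [hxs, List.idxOf_append_of_notMem hxp]
          simp [List.idxOf_cons_self]
        rw [h1, h2]
        exact List.idxOf_lt_length_of_mem hap
    rw [List.foldl_cons, hof]
    exact ih (p ++ [x]) (by simpa using hxs) hpw

theorem pv_ofList_pairwise_idx (xs : List String) :
    (PySem.Set.ofList xs).Pairwise (fun a b => xs.idxOf a < xs.idxOf b) := by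
  have := pv_ofList_aux xs xs [] rfl (by simp [PySem.Set.ofList, PySem.Set.empty])
  simpa [PySem.Set.ofList] using this

theorem pv_pairwise_flatMap_rep (r : String → Int) (idx : String → Nat) (n : String → Nat)
    (l : List String) (h : l.Pairwise (pvPlex r idx)) :
    (l.flatMap (fun s => List.replicate (n s) s)).Pairwise (pvLe r idx) := by
  induction l with
  | nil => simp
  | cons x l ih =>
    rw [List.pairwise_cons] at h
    rw [List.flatMap_cons]
    refine List.pairwise_append.mpr ⟨?_, ih h.2, ?_⟩
    · exact List.pairwise_replicate.mpr (Or.inr (Or.inr ⟨rfl, le_refl _⟩))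
    · intro a ha b hb
      have hax : a = x := List.eq_of_mem_replicate ha
      obtain ⟨s, hs, hb⟩ := List.mem_flatMap.mp hb
      have hbs : b = s := List.eq_of_mem_replicate hb
      rw [hax, hbs]
      rcases h.1 s hs with h' | ⟨h', h''⟩
      · exact Or.inl h'
      · exact Or.inr ⟨h', le_of_lt h''⟩

theorem pv_count_flatMap_rep (n : String → Nat) (a : String) : ∀ (l : List String), l.Nodup →
    ((l.flatMap (fun s => List.replicate (n s) s)).count a) = if a ∈ l then n a else 0 := by
  intro l
  induction l with
  | nil => simp
  | cons x l ih =>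
    intro hnd
    rw [List.nodup_cons] at hnd
    rw [List.flatMap_cons, List.count_append, List.count_replicate, ih hnd.2]
    by_cases hax : a = x
    · subst hax
      simp [hnd.1]
    · simp [hax, Ne.symm hax]

theorem pv_flatMap_rep_perm (xs : List String) :
    ((PySem.Set.ofList xs).flatMap (fun s => List.replicate (xs.count s) s)).Perm xs := by
  refine List.perm_iff_count.mpr fun a => ?_
  rw [pv_count_flatMap_rep _ a _ (PySem.Set.nodup_ofList xs)]
  by_cases ha : a ∈ xs
  · simp [PySem.Set.mem_ofList, ha]
  · simp [PySem.Set.mem_ofList, ha, List.count_eq_zero.mpr ha]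

-- A's full sort equals the rank-descending stable sort of the DISTINCT summaries expanded by multiplicity
theorem pv_ranked_eq (cat : String) (xs : List String) :
    PySem.List.sorted2 xs (fun s => -(pvRank cat s)) (fun s => (PySem.List.index? xs s).getD 0) false
      = (PySem.List.sorted (PySem.Set.ofList xs) (fun s => pvRank cat s) true).flatMap
          (fun s => List.replicate (xs.count s) s) := by
  have hbf_t : ∀ a b : String,
      ((fun a b : String => decide (-(pvRank cat a) < -(pvRank cat b)) ||
        (!decide (-(pvRank cat b) < -(pvRank cat a)) &&
          decide ((PySem.List.index? xs a).getD 0 < (PySem.List.index? xs b).getD 0))) a b = true)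
      ↔ (-(pvRank cat a) < -(pvRank cat b) ∨ (¬(-(pvRank cat b) < -(pvRank cat a)) ∧
          (PySem.List.index? xs a).getD 0 < (PySem.List.index? xs b).getD 0)) := by
    intro a b; simp
  set bf : String → String → Bool := fun a b =>
    decide (-(pvRank cat a) < -(pvRank cat b)) ||
      (!decide (-(pvRank cat b) < -(pvRank cat a)) &&
        decide ((PySem.List.index? xs a).getD 0 < (PySem.List.index? xs b).getD 0)) with hbf
  have hbf_f : ∀ a b : String, (bf a b = false)
      ↔ ¬(-(pvRank cat a) < -(pvRank cat b) ∨ (¬(-(pvRank cat b) < -(pvRank cat a)) ∧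
          (PySem.List.index? xs a).getD 0 < (PySem.List.index? xs b).getD 0)) := by
    intro a b
    rw [← Bool.not_eq_true, not_iff_not]
    exact hbf_t a b
  have h1 : ∀ a b, bf a b = true → bf b a = false := by
    intro a b h
    rw [hbf_t] at h
    rw [hbf_f]
    omega
  have h2 : ∀ a b c, bf a b = true → bf c b = false → bf c a = false := by
    intro a b c h h'
    rw [hbf_t] at h
    rw [hbf_f] at h' ⊢
    omega
  have hA : PySem.List.sorted2 xs (fun s => -(pvRank cat s)) (fun s => (PySem.List.index? xs s).getD 0) false
      = List.foldl (fun acc x => PySem.List.insertBy bf x acc) [] xs := rfl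
  have hApw := hA ▸ pv_foldl_insertBy_pairwise bf h1 h2 xs [] (by simp)
  have hAperm : (PySem.List.sorted2 xs (fun s => -(pvRank cat s)) (fun s => (PySem.List.index? xs s).getD 0) false).Perm xs :=
    PySem.List.sorted2_perm xs _ _ false
  have hAle : (PySem.List.sorted2 xs (fun s => -(pvRank cat s)) (fun s => (PySem.List.index? xs s).getD 0) false).Pairwise
      (pvLe (pvRank cat) (fun s => xs.idxOf s)) := by
    refine hApw.imp_of_mem ?_
    intro a b ha hb hab
    have ha' : a ∈ xs := hAperm.mem_iff.mp ha
    have hb' : b ∈ xs := hAperm.mem_iff.mp hb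
    rw [hbf_f, pv_idx_mem xs a ha', pv_idx_mem xs b hb'] at hab
    unfold pvLe
    dsimp only
    omega
  have hB : PySem.List.sorted (PySem.Set.ofList xs) (fun s => pvRank cat s) true
      = List.foldl (fun acc x => PySem.List.insertBy (fun a b => decide (pvRank cat b < pvRank cat a)) x acc) [] (PySem.Set.ofList xs) :=
    PySem.List.sorted_rev_eq_foldl_insertBy _ _
  have hBpw : (PySem.List.sorted (PySem.Set.ofList xs) (fun s => pvRank cat s) true).Pairwise
      (pvPlex (pvRank cat) (fun s => xs.idxOf s)) := by
    rw [hB]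
    exact pv_foldl_insertBy_plex _ _ _ [] (by simp) (by simp) (pv_ofList_pairwise_idx xs)
  have hEpw := pv_pairwise_flatMap_rep (pvRank cat) (fun s => xs.idxOf s) (fun s => xs.count s) _ hBpw
  have hEperm : ((PySem.List.sorted (PySem.Set.ofList xs) (fun s => pvRank cat s) true).flatMap
      (fun s => List.replicate (xs.count s) s)).Perm xs :=
    ((PySem.List.sorted_perm _ _ _).flatMap_right _).trans (pv_flatMap_rep_perm xs)
  refine List.Perm.eq_of_pairwise ?_ hAle hEpw (hAperm.trans hEperm.symm)
  intro a b ha hb h h'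
  have ha' : a ∈ xs := hAperm.mem_iff.mp ha
  have hb' : b ∈ xs := hEperm.mem_iff.mp hb
  have hidx : xs.idxOf a = xs.idxOf b := by
    unfold pvLe at h h'
    dsimp only at h h'
    omega
  exact (List.idxOf_inj ha').mp hidx

-- B's buckets: lookup is a filter of the distinct summaries
theorem pv_bucket_getD (R : String → Int) (ds : List String) (σ : Int) :
    ((ds.foldl (fun b s => b.modify (R s) [] (fun l => l ++ [s]))
        (PySem.Dict.empty : PySem.Dict Int (List String))).getD σ [])
      = ds.filter (fun s => R s == σ) := by
  have h : ds.foldl (fun b s => b.modify (R s) [] (fun l => l ++ [s]))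
        (PySem.Dict.empty : PySem.Dict Int (List String))
      = (ds.map (fun s => (R s, s))).foldl (fun d p => d.modify p.1 [] (fun l => l ++ [p.2]))
        PySem.Dict.empty := by
    rw [List.foldl_map]
  rw [h, PySem.Dict.getD_foldl_modify_append, PySem.Dict.getD_empty, List.filter_map]
  simp [Function.comp_def]

theorem pv_bucket_keys (R : String → Int) (ds : List String) :
    (ds.foldl (fun b s => b.modify (R s) [] (fun l => l ++ [s]))
        (PySem.Dict.empty : PySem.Dict Int (List String))).keys
      = PySem.Set.ofList (ds.map R) := by
  have := PySem.Dict.keys_foldl_modify_key ds R [] (fun _ s l => l ++ [s])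
    (PySem.Dict.empty : PySem.Dict Int (List String))
  simpa [PySem.Dict.keys_empty, PySem.Set.ofList] using this

-- the sorted distinct scores are strictly descending
theorem pv_scores_pairwise_gt (scores : List Int) :
    (PySem.List.sorted (PySem.Set.ofList scores) (fun x => x) true).Pairwise (fun a b => b < a) := by
  have h1 := PySem.List.sorted_pairwise_rev (PySem.Set.ofList scores) (fun x : Int => x)
  have h2 : (PySem.List.sorted (PySem.Set.ofList scores) (fun x : Int => x) true).Nodup :=
    ((PySem.List.sorted_perm _ _ _).nodup_iff).mpr (PySem.Set.nodup_ofList scores)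
  refine (h1.and h2).imp ?_
  intro a b hab
  exact lt_of_le_of_ne hab.1 (Ne.symm hab.2)

-- the score-ordered bucket flatten is pairwise in A's lexicographic order
theorem pv_flatten_pairwise (R : String → Int) (idx : String → Nat) (ds : List String)
    (hds : ds.Pairwise (fun a b => idx a < idx b)) :
    ∀ (σs : List Int), σs.Pairwise (fun a b => b < a) →
    (σs.flatMap (fun σ => ds.filter (fun s => R s == σ))).Pairwise (pvPlex R idx) := by
  intro σs
  induction σs with
  | nil => simp
  | cons σ σt ih =>
    intro h
    rw [List.pairwise_cons] at h
    rw [List.flatMap_cons]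
    refine List.pairwise_append.mpr ⟨?_, ih h.2, ?_⟩
    · refine (hds.filter _).imp_of_mem ?_
      intro a b ha hb hab
      have hra : R a = σ := by simpa using (List.of_mem_filter ha)
      have hrb : R b = σ := by simpa using (List.of_mem_filter hb)
      exact Or.inr ⟨hra.trans hrb.symm, hab⟩
    · intro a ha b hb
      have hra : R a = σ := by simpa using (List.of_mem_filter ha)
      obtain ⟨σ', hσ', hb'⟩ := List.mem_flatMap.mp hb
      have hrb : R b = σ' := by simpa using (List.of_mem_filter hb')
      exact Or.inl (by rw [hra, hrb]; exact h.1 σ' hσ')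

-- and it is a permutation of the distinct summaries
theorem pv_flatten_perm (R : String → Int) (ds : List String) :
    ∀ (σs : List Int), σs.Nodup → (∀ s ∈ ds, R s ∈ σs) →
    (σs.flatMap (fun σ => ds.filter (fun s => R s == σ))).Perm ds := by
  have hcount : ∀ (a : String) (σs : List Int), σs.Nodup →
      (σs.flatMap (fun σ => ds.filter (fun s => R s == σ))).count a
        = if R a ∈ σs then ds.count a else 0 := by
    intro a σs
    induction σs with
    | nil => simp
    | cons σ σt ih =>
      intro hσ
      rw [List.nodup_cons] at hσ
      rw [List.flatMap_cons, List.count_append, ih hσ.2]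
      by_cases hra : R a = σ
      · have hf : (ds.filter (fun s => R s == σ)).count a = ds.count a :=
          List.count_filter (by simpa using hra)
        simp [hf, hra, hσ.1]
      · have hf : (ds.filter (fun s => R s == σ)).count a = 0 :=
          List.count_eq_zero.mpr (fun hm => hra (by simpa using (List.of_mem_filter hm)))
        simp [hf, hra]
  intro σs hσ hcov
  refine List.perm_iff_count.mpr fun a => ?_
  rw [hcount a σs hσ]
  by_cases ha : a ∈ ds
  · rw [if_pos (hcov a ha)]
  · rw [List.count_eq_zero.mpr ha]
    simp

-- central lemma: B's score-ordered bucket flatten IS the rank-descending stable sort of ds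
theorem pv_flatten_eq (cat : String) (xs : List String) :
    ((PySem.List.sorted (PySem.Set.ofList ((PySem.Set.ofList xs).map (pvRank cat))) (fun x => x) true).flatMap
        (fun σ => (PySem.Set.ofList xs).filter (fun s => pvRank cat s == σ)))
      = PySem.List.sorted (PySem.Set.ofList xs) (fun s => pvRank cat s) true := by
  set ds := PySem.Set.ofList xs with hds
  set σs := PySem.List.sorted (PySem.Set.ofList (ds.map (pvRank cat))) (fun x : Int => x) true with hσs
  have hdpw : ds.Pairwise (fun a b => xs.idxOf a < xs.idxOf b) := pv_ofList_pairwise_idx xs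
  have hLpw : (σs.flatMap (fun σ => ds.filter (fun s => pvRank cat s == σ))).Pairwise
      (pvPlex (pvRank cat) (fun s => xs.idxOf s)) :=
    pv_flatten_pairwise _ _ ds hdpw σs (pv_scores_pairwise_gt _)
  have hLperm : (σs.flatMap (fun σ => ds.filter (fun s => pvRank cat s == σ))).Perm ds := by
    refine pv_flatten_perm _ ds σs
      (((PySem.List.sorted_perm _ _ _).nodup_iff).mpr (PySem.Set.nodup_ofList _)) ?_
    intro s hs
    rw [hσs, PySem.List.mem_sorted, PySem.Set.mem_ofList]
    exact List.mem_map_of_mem hs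
  have hRpw : (PySem.List.sorted ds (fun s => pvRank cat s) true).Pairwise
      (pvPlex (pvRank cat) (fun s => xs.idxOf s)) := by
    rw [PySem.List.sorted_rev_eq_foldl_insertBy]
    exact pv_foldl_insertBy_plex _ _ _ [] (by simp) (by simp) hdpw
  have hRperm : (PySem.List.sorted ds (fun s => pvRank cat s) true).Perm ds :=
    PySem.List.sorted_perm _ _ _
  have hweak : ∀ a b : String, pvPlex (pvRank cat) (fun s => xs.idxOf s) a b →
      pvLe (pvRank cat) (fun s => xs.idxOf s) a b := by
    intro a b h
    rcases h with h | ⟨h1, h2⟩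
    · exact Or.inl h
    · exact Or.inr ⟨h1, le_of_lt h2⟩
  refine List.Perm.eq_of_pairwise ?_
    (hLpw.imp (fun {a b} h => hweak a b h))
    (hRpw.imp (fun {a b} h => hweak a b h))
    (hLperm.trans hRperm.symm)
  intro a b ha hb h h'
  have ha' : a ∈ xs := (PySem.Set.mem_ofList xs a).mp (hLperm.mem_iff.mp ha)
  have hidx : xs.idxOf a = xs.idxOf b := by
    unfold pvLe at h h'
    dsimp only at h h'
    omega
  exact (List.idxOf_inj ha').mp hidx

-- ===== VERDICT (by name: the statement is the Claim_ definition above) =====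
theorem choose_primary_summary_py_spec : Claim_equal_choose_primary_summary_py := by
  intro category summaries _
  unfold Spec_choose_primary_summary_py
  by_cases hs : summaries = []
  · simp [choose_primary_summary_py, choose_primary_summary_py_alt, hs]
  · simp only [choose_primary_summary_py, choose_primary_summary_py_alt, if_neg hs]
    set cat := PySem.Str.lower (category.getD "") with hcat
    set ds := PySem.Set.ofList summaries with hds
    -- the counts dict is Counter(summaries); its lookups are multiplicities
    have hcnt : (summaries.foldl (fun d s => d.modify s 0 (fun c => c + 1))
        (PySem.Dict.empty : PySem.Dict String Int)) = PySem.Dict.counter summaries := rfl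
    have hrepfun : (fun s => List.replicate ((PySem.Dict.counter summaries).getD s 0).toNat s)
        = (fun s => List.replicate (summaries.count s) s) := by
      funext s
      rw [PySem.Dict.getD_counter]
      simp
    have hckeys : (PySem.Dict.counter summaries).keys = ds := PySem.Dict.keys_counter summaries
    rw [hcnt, pv_ranked_eq cat summaries, ← hds]
    set buckets := (PySem.Dict.counter summaries).keys.foldl
        (fun b s => b.modify (pvRank cat s) [] (fun l => l ++ [s]))
        (PySem.Dict.empty : PySem.Dict Int (List String)) with hbuckets
    have hbkeys : buckets.keys = PySem.Set.ofList (ds.map (pvRank cat)) := by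
      rw [hbuckets, hckeys, pv_bucket_keys]
    have hbget : ∀ σ, buckets.getD σ [] = ds.filter (fun s => pvRank cat s == σ) := by
      intro σ
      rw [hbuckets, hckeys, pv_bucket_getD]
    set σs := PySem.List.sorted (PySem.Set.ofList (ds.map (pvRank cat))) (fun x : Int => x) true with hσs
    have hsortkeys : PySem.List.sorted buckets.keys (fun x : Int => x) true = σs := by
      rw [hbkeys]
    have hflat : σs.flatMap (fun σ => ds.filter (fun s => pvRank cat s == σ))
        = PySem.List.sorted ds (fun s => pvRank cat s) true := pv_flatten_eq cat summaries
    cases horder : PySem.List.sorted ds (fun s => pvRank cat s) true with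
    | nil =>
      exfalso
      have hnil : ds = [] := (PySem.List.sorted_eq_nil_iff _ _ _).mp horder
      cases hsum : summaries with
      | nil => exact hs hsum
      | cons y ys =>
        have hy : y ∈ PySem.Set.ofList (y :: ys) :=
          (PySem.Set.mem_ofList _ _).mpr (List.mem_cons_self ..)
        rw [← hsum, ← hds, hnil] at hy
        simp at hy
    | cons p rest =>
      rw [horder] at hflat
      have hσne : σs ≠ [] := by
        intro h0
        rw [h0, List.flatMap_nil] at hflat
        exact List.cons_ne_nil p rest hflat.symm
      obtain ⟨σ0, σt, hσcons⟩ := List.exists_cons_of_ne_nil hσne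
      have hflatcons : (ds.filter (fun s => pvRank cat s == σ0))
          ++ σt.flatMap (fun σ => ds.filter (fun s => pvRank cat s == σ)) = p :: rest := by
        have h' := hflat
        rw [hσcons, List.flatMap_cons] at h'
        exact h'
      -- max(buckets) is σ0, the head of the descending sorted keys
      have hmax : PySem.List.max? buckets.keys (fun x => x) = some σ0 := by
        cases hm : PySem.List.max? buckets.keys (fun x : Int => x) with
        | none =>
          exfalso
          have hknil : buckets.keys = [] := (PySem.List.max?_eq_none_iff _ _).mp hm
          rw [hknil] at hsortkeys
          exact hσne (hsortkeys.symm.trans ((PySem.List.sorted_eq_nil_iff _ _ _).mpr rfl))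
        | some m =>
          have hmem : m ∈ buckets.keys := PySem.List.max?_mem hm
          have hσ0mem : σ0 ∈ buckets.keys := by
            have hin : σ0 ∈ σs := hσcons ▸ List.mem_cons_self ..
            rw [← hsortkeys] at hin
            exact (PySem.List.mem_sorted _ _ _ _).mp hin
          have h1 : σ0 ≤ m := PySem.List.max?_isMax hm σ0 hσ0mem
          have h2 : m ≤ σ0 := PySem.List.key_head_sorted_rev_ge buckets.keys (fun x : Int => x)
            (hsortkeys.trans hσcons) m hmem
          rw [le_antisymm h2 h1]
      -- the max-score bucket is nonempty and starts with p
      have hbne : ds.filter (fun s => pvRank cat s == σ0) ≠ [] := by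
        -- an empty σ0-bucket would mean the score σ0 has no preimage in ds,
        -- yet σ0 ∈ ds.map rank
        intro h0
        have hσ0mem : σ0 ∈ σs := hσcons ▸ List.mem_cons_self ..
        have hσ0mem' : σ0 ∈ ds.map (pvRank cat) :=
          (PySem.Set.mem_ofList _ _).mp ((PySem.List.mem_sorted _ _ _ _).mp hσ0mem)
        obtain ⟨s, hsd, hRs⟩ := List.mem_map.mp hσ0mem'
        have : s ∈ ds.filter (fun s => pvRank cat s == σ0) :=
          List.mem_filter.mpr ⟨hsd, by simpa using hRs⟩
        rw [h0] at this
        simp at this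
      obtain ⟨q, bt, hbcons⟩ := List.exists_cons_of_ne_nil hbne
      have hqp : q = p := by
        have h' := hflatcons
        rw [hbcons] at h'
        simpa using congrArg List.head? h'
      have hhead : (buckets.getD σ0 []).head? = some p := by
        rw [hbget, hbcons, hqp]
        rfl
      simp only [hmax, hhead]
      -- facts about the ordered distinct list p :: rest
      have hnd : (p :: rest).Nodup := by
        rw [← horder]
        exact ((PySem.List.sorted_perm _ _ _).nodup_iff).mpr (PySem.Set.nodup_ofList summaries)
      have hp_mem : p ∈ summaries := by
        have hp : p ∈ PySem.List.sorted ds (fun s => pvRank cat s) true := by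
          rw [horder]; exact List.mem_cons_self ..
        exact (PySem.Set.mem_ofList _ _).mp ((PySem.List.mem_sorted _ _ _ _).mp hp)
      have hc : 0 < summaries.count p := List.count_pos_iff.mpr hp_mem
      -- expose A's head: replicate (count p) p = p :: replicate (count p - 1) p
      have hrep : List.replicate (summaries.count p) p
          = p :: List.replicate (summaries.count p - 1) p := by
        cases hcn : summaries.count p with
        | zero => omega
        | succ k => simp [List.replicate_succ]
      rw [List.flatMap_cons, hrep, List.cons_append]
      dsimp only
      refine Prod.ext rfl ?_
      dsimp only
      -- A's supporting: the filter drops exactly the remaining copies of p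
      have hA2 : ((List.replicate (summaries.count p - 1) p
            ++ rest.flatMap (fun s => List.replicate (summaries.count s) s)).filter (fun s => s != p))
          = rest.flatMap (fun s => List.replicate (summaries.count s) s) := by
        rw [List.filter_append]
        have h1 : (List.replicate (summaries.count p - 1) p).filter (fun s => s != p) = [] := by
          simp
        have h2 : (rest.flatMap (fun s => List.replicate (summaries.count s) s)).filter
            (fun s => s != p) = rest.flatMap (fun s => List.replicate (summaries.count s) s) := by
          refine List.filter_eq_self.mpr ?_
          intro b hb
          obtain ⟨s, hsr, hb'⟩ := List.mem_flatMap.mp hb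
          have hbs : b = s := List.eq_of_mem_replicate hb'
          have hpr : p ∉ rest := (List.nodup_cons.mp hnd).1
          have hbp : b ≠ p := by
            rw [hbs]; intro h; rw [h] at hsr; exact hpr hsr
          simpa [bne_iff_ne] using hbp
        rw [h1, h2, List.nil_append]
      rw [hA2]
      -- B's supporting: nested folds → buckets filtered of p, expanded by multiplicity
      have hstep : ∀ (acc : List String) (σ : Int),
          (buckets.getD σ []).foldl
            (fun acc2 s => if s != p then acc2 ++ List.replicate ((PySem.Dict.counter summaries).getD s 0).toNat s else acc2) acc
          = acc ++ ((buckets.getD σ []).filter (fun s => s != p)).flatMap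
              (fun s => List.replicate (summaries.count s) s) := by
        intro acc σ
        rw [PySem.List.foldl_if_eq_foldl_filter (fun s => s != p)
          (fun acc2 s => acc2 ++ List.replicate ((PySem.Dict.counter summaries).getD s 0).toNat s)]
        rw [PySem.List.foldl_append_eq_flatMap, hrepfun]
      rw [PySem.List.foldl_congr_mem (PySem.List.sorted buckets.keys (fun x : Int => x) true) _
        (fun acc σ => acc ++ ((buckets.getD σ []).filter (fun s => s != p)).flatMap
          (fun s => List.replicate (summaries.count s) s)) []
        (fun acc σ _ => hstep acc σ)]
      rw [PySem.List.foldl_append_eq_flatMap, List.nil_append, hsortkeys]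
      -- collapse the filtered bucket flatten to rest
      have hbgetfun : (fun σ => buckets.getD σ []) = (fun σ => ds.filter (fun s => pvRank cat s == σ)) := by
        funext σ
        exact hbget σ
      symm
      calc σs.flatMap (fun σ => ((buckets.getD σ []).filter (fun s => s != p)).flatMap
              (fun s => List.replicate (summaries.count s) s))
          = ((σs.flatMap (fun σ => buckets.getD σ [])).filter (fun s => s != p)).flatMap
              (fun s => List.replicate (summaries.count s) s) := by
            rw [List.filter_flatMap, List.flatMap_assoc]
        _ = ((p :: rest).filter (fun s => s != p)).flatMap
              (fun s => List.replicate (summaries.count s) s) := by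
            rw [hbgetfun]
            rw [show σs.flatMap (fun σ => ds.filter (fun s => pvRank cat s == σ)) = p :: rest from hflat]
        _ = rest.flatMap (fun s => List.replicate (summaries.count s) s) := by
            have hfilt : (p :: rest).filter (fun s => s != p) = rest := by
              rw [List.filter_cons]
              simp only [bne_self_eq_false, Bool.false_eq_true, if_false]
              refine List.filter_eq_self.mpr ?_
              intro b hb
              have hpr : p ∉ rest := (List.nodup_cons.mp hnd).1
              have : b ≠ p := fun h => hpr (h ▸ hb)
              simpa [bne_iff_ne] using this
            rw [hfilt]
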